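-- pv_equiv track=rewrite | github.com/volcengine/verl | atropos/environments/intern_bootcamp/internbootcamp_lib/internbootcamp/bootcamp/carrayproduct/carrayproduct.py | simulate_operations
-- ===== SOURCE A (Python) =====
-- def simulate_operations(initial_arr, operations):
--     """强化模拟校验"""
--     exists = set(range(1, len(initial_arr)+1))
--     values = {i: v for i, v in enumerate(initial_arr, 1)}
--     op2_used = False
--     last_valid_value = None
--
--     for op in operations:
--         parts = op.split()
--         if not parts:
--             return None
--
--         if parts[0] == '1':
--             if len(parts) != 3:
--                 return None
--             try:
--                 i, j = map(int, parts[1:])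
--             except:
--                 return None
--             if i not in exists or j not in exists or i == j:
--                 return None
--             values[j] = values[i] * values[j]
--             exists.remove(i)
--             del values[i]
--
--         elif parts[0] == '2':
--             if op2_used or len(parts) != 2:
--                 return None
--             try:
--                 i = int(parts[1])
--             except:
--                 return None
--             if i not in exists:
--                 return None
--             exists.remove(i)
--             del values[i]
--             op2_used = True
--
--         else:
--             return None
--
--     return values[next(iter(exists))] if len(exists) == 1 else None
-- ===== SOURCE B (Python) =====
-- def _parse(op):
--     """Parse an operation string into ('1', i, j) or ('2', i), else None."""
--     parts = op.split()
--     if len(parts) == 3 and parts[0] == '1':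
--         try:
--             return ('1', int(parts[1]), int(parts[2]))
--         except ValueError:
--             return None
--     if len(parts) == 2 and parts[0] == '2':
--         try:
--             return ('2', int(parts[1]))
--         except ValueError:
--             return None
--     return None
--
--
-- def simulate_operations(initial_arr, operations):
--     # Maintain, per surviving index, the list of initial values merged into it;
--     # multiply once at the end instead of per-operation.
--     groups = {k: [v] for k, v in enumerate(initial_arr, 1)}
--     op2_used = False
--     for op in operations:
--         p = _parse(op)
--         if p is None:
--             return None
--         if p[0] == '1':
--             _, i, j = p
--             if i == j or i not in groups or j not in groups:
--                 return None
--             gi = groups.pop(i)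
--             groups[j] = groups[j] + gi
--         else:
--             i = p[1]
--             if op2_used or i not in groups:
--                 return None
--             del groups[i]
--             op2_used = True
--     if len(groups) != 1:
--         return None
--     result = 1
--     for v in next(iter(groups.values())):
--         result *= v
--     return result
-- ===== Notes on version B (the rewrite author's own statement) =====
-- stated objective: alternative
-- what changed: B parses each operation string up front into a structured op, maintains a single dict mapping each live index to the list of initial values merged into it (instead of A's exists-set plus per-operation product accumulation), and computes the product once in a closing pass over the surviving group.
import Mathlib
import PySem

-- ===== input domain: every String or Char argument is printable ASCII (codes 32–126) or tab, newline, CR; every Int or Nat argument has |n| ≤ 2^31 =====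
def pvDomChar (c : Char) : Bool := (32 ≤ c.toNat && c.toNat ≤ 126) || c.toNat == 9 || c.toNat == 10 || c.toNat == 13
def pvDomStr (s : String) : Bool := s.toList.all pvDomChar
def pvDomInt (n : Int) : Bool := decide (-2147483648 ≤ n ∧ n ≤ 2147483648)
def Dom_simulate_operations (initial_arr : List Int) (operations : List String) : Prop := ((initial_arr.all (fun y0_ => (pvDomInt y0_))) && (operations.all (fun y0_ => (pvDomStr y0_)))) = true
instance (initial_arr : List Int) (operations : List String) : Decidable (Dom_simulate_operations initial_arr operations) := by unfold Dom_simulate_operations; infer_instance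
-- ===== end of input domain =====

-- B replaces A's per-operation product accumulation by merge-group bookkeeping with one closing
-- product pass (alternative decomposition; same validity checks, hence the same return value).

-- ===== PORT A =====
-- A's loop: `exists` set of live 1-based indices, `values` dict of running products, early returns.
-- `exists.remove(i)` / `values[i]` are ported as `Set.discard` / `getD _ 0`: the membership guard
-- just above each of them makes the KeyError branch unreachable, so the values agree.
def simulate_operationsA_loop (ops : List String) (ex : PySem.Set Int)
    (values : PySem.Dict Int Int) (op2_used : Bool) : Option Int :=
  match ops with
  | [] =>
      -- return values[next(iter(exists))] if len(exists) == 1 else None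
      if PySem.Set.len ex = 1 then
        match ex with
        | [k] => values.get? k
        | _ => none
      else none
  | op :: rest =>
      match PySem.Str.split₀ op with
      | [] => none                                   -- if not parts: return None
      | p0 :: ptail =>
        if p0 = "1" then
          if PySem.List.len (p0 :: ptail) ≠ 3 then none
          else match ptail with
            | [s1, s2] =>
              match PySem.Int.ofStr? s1, PySem.Int.ofStr? s2 with
              | some i, some j =>
                if !(PySem.Set.contains ex i) || !(PySem.Set.contains ex j) || i == j then none
                else simulate_operationsA_loop rest (PySem.Set.discard ex i)
                       ((values.insert j (values.getD i 0 * values.getD j 0)).erase i) op2_used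
              | _, _ => none                         -- except: return None
            | _ => none                              -- unreachable (len = 3)
        else if p0 = "2" then
          if op2_used || PySem.List.len (p0 :: ptail) ≠ 2 then none
          else match ptail with
            | [s1] =>
              match PySem.Int.ofStr? s1 with
              | some i =>
                if !(PySem.Set.contains ex i) then none
                else simulate_operationsA_loop rest (PySem.Set.discard ex i) (values.erase i) true
              | none => none                         -- except: return None
            | _ => none                              -- unreachable (len = 2)
        else none

def simulate_operations (initial_arr : List Int) (operations : List String) : Option Int :=
  simulate_operationsA_loop operations
    (PySem.Set.ofList (PySem.List.pyRange 1 (PySem.List.len initial_arr + 1) 1))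
    ((PySem.List.enumerate initial_arr 1).foldl (fun d p => d.insert p.1 p.2) PySem.Dict.empty)
    false

-- ===== PORT B =====
-- B (Source B): parse each operation up front (`_parse`), keep a single dict mapping each live index
-- to the LIST of initial values merged into it, and take one product at the end.
inductive PvOp
  | op1 : Int → Int → PvOp
  | op2 : Int → PvOp
deriving DecidableEq, Repr

def pvParse (op : String) : Option PvOp :=
  match PySem.Str.split₀ op with
  | [p0, s1, s2] =>
      if p0 = "1" then
        match PySem.Int.ofStr? s1, PySem.Int.ofStr? s2 with
        | some i, some j => some (PvOp.op1 i j)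
        | _, _ => none
      else none
  | [p0, s1] =>
      if p0 = "2" then (PySem.Int.ofStr? s1).map PvOp.op2
      else none
  | _ => none

def simulate_operationsB_loop (ops : List String) (groups : PySem.Dict Int (List Int))
    (op2_used : Bool) : Option Int :=
  match ops with
  | [] =>
      if groups.size = 1 then
        match groups.values with
        | [g] => some (g.foldl (· * ·) 1)            -- result = 1; for v in …: result *= v
        | _ => none
      else none
  | op :: rest =>
      match pvParse op with
      | none => none
      | some (PvOp.op1 i j) =>
          if i == j || !(groups.contains i) || !(groups.contains j) then none
          else
            let gi := groups.getD i []               -- gi = groups.pop(i) …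
            let g' := groups.erase i
            simulate_operationsB_loop rest (g'.insert j (g'.getD j [] ++ gi)) op2_used
      | some (PvOp.op2 i) =>
          if op2_used || !(groups.contains i) then none
          else simulate_operationsB_loop rest (groups.erase i) true

def simulate_operations_alt (initial_arr : List Int) (operations : List String) : Option Int :=
  simulate_operationsB_loop operations
    ((PySem.List.enumerate initial_arr 1).foldl (fun d p => d.insert p.1 [p.2]) PySem.Dict.empty)
    false

-- ===== PRECONDITION & SPEC =====
def Spec_simulate_operations (initial_arr : List Int) (operations : List String) (out : Option Int) : Prop := out = simulate_operations_alt initial_arr operations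
instance (initial_arr : List Int) (operations : List String) (out : Option Int) : Decidable (Spec_simulate_operations initial_arr operations out) := by unfold Spec_simulate_operations; infer_instance

-- ===== CLAIM (what is proved, stated in full; the proofs are below) =====
def Claim_equal_simulate_operations : Prop := ∀ (initial_arr : List Int) (operations : List String), Dom_simulate_operations initial_arr operations → Spec_simulate_operations initial_arr operations (simulate_operations initial_arr operations)

-- ===== LEMMAS AND PROOFS =====

-- Relation between an entry of A's `values` and the matching entry of B's `groups`:
-- same key, and A's running product is the product of B's value list.
def pvRel (a : Int × Int) (b : Int × List Int) : Prop := a.1 = b.1 ∧ a.2 = b.2.foldl (· * ·) 1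

theorem pv_keys_eq {va : List (Int × Int)} {gb : List (Int × List Int)}
    (h : List.Forall₂ pvRel va gb) : va.map (·.1) = gb.map (·.1) := by
  induction h with
  | nil => rfl
  | cons hab _ ih => simp [ih, hab.1]

theorem pv_find?_eq {va : List (Int × Int)} {gb : List (Int × List Int)} (k : Int)
    (h : List.Forall₂ pvRel va gb) :
    (va.find? (fun p => p.1 == k)).map (·.2)
      = ((gb.find? (fun p => p.1 == k)).map (·.2)).map (fun l => l.foldl (· * ·) 1) := by
  induction h with
  | nil => rfl
  | @cons a b l1 l2 hab htl ih =>
      obtain ⟨h1, h2⟩ := hab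
      by_cases hk : a.1 = k
      · have hk2 : b.1 = k := h1 ▸ hk
        simp [hk, hk2, h2]
      · have hk2 : ¬ b.1 = k := fun hx => hk (h1 ▸ hx)
        simp [hk, hk2, ih]

theorem pv_get?_eq {values : PySem.Dict Int Int} {groups : PySem.Dict Int (List Int)} (k : Int)
    (h : List.Forall₂ pvRel values.items groups.items) :
    values.get? k = (groups.get? k).map (fun l => l.foldl (· * ·) 1) := by
  simpa [PySem.Dict.get?] using pv_find?_eq k h

theorem pv_contains_eq {values : PySem.Dict Int Int} {groups : PySem.Dict Int (List Int)} (k : Int)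
    (h : List.Forall₂ pvRel values.items groups.items) :
    values.contains k = groups.contains k := by
  rw [PySem.Dict.contains_eq_decide_mem_keys, PySem.Dict.contains_eq_decide_mem_keys,
    PySem.Dict.keys, PySem.Dict.keys, pv_keys_eq h]


theorem pv_set_contains {κ : Type} (values : PySem.Dict Int κ) (k : Int) :
    PySem.Set.contains values.keys k = values.contains k := by
  rw [PySem.Dict.contains_eq_decide_mem_keys]
  simp [PySem.Set.contains]

theorem pv_keys_erase {ν : Type} (d : PySem.Dict Int ν) (i : Int) :
    (d.erase i).keys = d.keys.filter (fun y => !(y == i)) := by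
  show (d.items.filter (fun p => !(p.1 == i))).map (·.1)
      = (d.items.map (·.1)).filter (fun y => !(y == i))
  induction d.items with
  | nil => rfl
  | cons p t iht => by_cases hp : p.1 = i <;> simp [hp, iht]

theorem pv_find?_filter {ν : Type} (l : List (Int × ν)) (i j : Int) (hij : j ≠ i) :
    (l.filter (fun p => !(p.1 == i))).find? (fun p => p.1 == j)
      = l.find? (fun p => p.1 == j) := by
  have hji : i ≠ j := fun hx => hij hx.symm
  induction l with
  | nil => rfl
  | cons p t iht =>
      by_cases hpi : p.1 = i
      · have hpj : ¬ p.1 = j := fun hx => hij (hx.symm.trans hpi)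
        simp [hpi, hpj, hji, iht]
      · by_cases hpj : p.1 = j <;> simp [List.filter_cons, hpi, hpj, hij, iht]

theorem pv_get?_erase_ne {ν : Type} (d : PySem.Dict Int ν) (i j : Int) (hij : j ≠ i) :
    (d.erase i).get? j = d.get? j := by
  simp only [PySem.Dict.get?, PySem.Dict.erase, pv_find?_filter d.items i j hij]

theorem pv_foldl_mul (l : List Int) (a : Int) :
    l.foldl (· * ·) a = a * l.foldl (· * ·) 1 := by
  induction l generalizing a with
  | nil => simp
  | cons x t iht => simp only [List.foldl_cons]; rw [iht, iht (1 * x)]; ring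

theorem pv_foldl_mul_append (l1 l2 : List Int) :
    (l1 ++ l2).foldl (· * ·) 1 = l1.foldl (· * ·) 1 * l2.foldl (· * ·) 1 := by
  rw [List.foldl_append, pv_foldl_mul]

theorem pv_forall2_filter {va : List (Int × Int)} {gb : List (Int × List Int)} (i : Int)
    (h : List.Forall₂ pvRel va gb) :
    List.Forall₂ pvRel (va.filter (fun p => !(p.1 == i))) (gb.filter (fun p => !(p.1 == i))) := by
  induction h with
  | nil => exact List.Forall₂.nil
  | @cons a b l1 l2 hab htl ih =>
      by_cases hp : a.1 = i
      · have hb : b.1 = i := hab.1 ▸ hp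
        simpa [List.filter_cons, hp, hb] using ih
      · have hb : ¬ b.1 = i := fun hx => hp (hab.1 ▸ hx)
        simpa [List.filter_cons, hp, hb] using List.Forall₂.cons hab ih

theorem pv_forall2_update {va : List (Int × Int)} {gb : List (Int × List Int)}
    (i j w : Int) (lw : List Int) (hij : j ≠ i) (hw : w = lw.foldl (· * ·) 1)
    (h : List.Forall₂ pvRel va gb) :
    List.Forall₂ pvRel
      ((va.map (fun p => if p.1 == j then (j, w) else p)).filter (fun p => !(p.1 == i)))
      ((gb.filter (fun p => !(p.1 == i))).map (fun p => if p.1 == j then (j, lw) else p)) := by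
  have hji : i ≠ j := fun hx => hij hx.symm
  induction h with
  | nil => exact List.Forall₂.nil
  | @cons a b l1 l2 hab htl ih =>
      by_cases hpj : a.1 = j
      · have hbj : b.1 = j := hab.1 ▸ hpj
        simpa [List.filter_cons, List.map_cons, hpj, hbj, hij, hji]
          using List.Forall₂.cons ⟨rfl, hw⟩ ih
      · have hbj : ¬ b.1 = j := fun hx => hpj (hab.1 ▸ hx)
        by_cases hpi : a.1 = i
        · have hbi : b.1 = i := hab.1 ▸ hpi
          simpa [List.filter_cons, List.map_cons, hpj, hbj, hpi, hbi, hij, hji] using ih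
        · have hbi : ¬ b.1 = i := fun hx => hpi (hab.1 ▸ hx)
          simpa [List.filter_cons, List.map_cons, hpj, hbj, hpi, hbi, hij, hji]
            using List.Forall₂.cons hab ih

theorem pv_ofList_append (xs acc : List Int) (hd : (acc ++ xs).Nodup) :
    xs.foldl PySem.Set.add acc = acc ++ xs := by
  induction xs generalizing acc with
  | nil => simp
  | cons x t iht =>
      have hx : x ∉ acc := by
        intro hmem
        exact (List.disjoint_of_nodup_append hd) hmem (List.mem_cons_self ..)
      have hadd : PySem.Set.add acc x = acc ++ [x] := by
        simp [PySem.Set.add, PySem.Set.contains, hx]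
      rw [List.foldl_cons, hadd, iht (acc ++ [x]) (by simpa using hd)]
      simp

theorem pv_loop_eq (ops : List String) : ∀ (values : PySem.Dict Int Int)
    (groups : PySem.Dict Int (List Int)) (op2 : Bool),
    List.Forall₂ pvRel values.items groups.items →
    simulate_operationsA_loop ops values.keys values op2
      = simulate_operationsB_loop ops groups op2 := by
  induction ops with
  | nil =>
      intro values groups op2 h
      obtain ⟨iv⟩ := values
      obtain ⟨ig⟩ := groups
      simp only [PySem.Dict.items] at h
      rcases h with _ | ⟨⟨h1, h2⟩, htl⟩
      · rfl
      · rename_i a b ta tb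
        rcases htl with _ | ⟨hab2, htl2⟩
        · simp [simulate_operationsA_loop, simulate_operationsB_loop, PySem.Set.len,
            PySem.Dict.keys, PySem.Dict.items, PySem.Dict.get?, PySem.Dict.size,
            PySem.Dict.values, h1, h2]
        · rename_i a2 b2 ta2 tb2
          have hA : ¬ (PySem.Set.len ((PySem.Dict.mk (a :: a2 :: ta2)).keys) = 1) := by
            simp [PySem.Set.len, PySem.Dict.keys, PySem.Dict.items]
            omega
          have hB : ¬ ((PySem.Dict.mk (b :: b2 :: tb2)).size = 1) := by
            simp [PySem.Dict.size, PySem.Dict.items]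
          simp [simulate_operationsA_loop, simulate_operationsB_loop, hA, hB]
  | cons op rest ih =>
      intro values groups op2 h
      rcases hsp : PySem.Str.split₀ op with _ | ⟨p0, pt⟩
      · simp [simulate_operationsA_loop, simulate_operationsB_loop, pvParse, hsp]
      rcases pt with _ | ⟨s1, pt⟩
      · -- parts = [p0]
        by_cases hp1 : p0 = "1" <;> by_cases hp2 : p0 = "2" <;>
          simp [simulate_operationsA_loop, simulate_operationsB_loop, pvParse, hsp,
            hp1, hp2, PySem.List.len_eq]
      rcases pt with _ | ⟨s2, pt⟩
      · -- parts = [p0, s1]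
        by_cases hp1 : p0 = "1"
        · have hp2 : p0 ≠ "2" := by rw [hp1]; decide
          simp [simulate_operationsA_loop, simulate_operationsB_loop, pvParse, hsp,
            hp1, hp2, PySem.List.len_eq]
        · by_cases hp2 : p0 = "2"
          · simp only [simulate_operationsA_loop, simulate_operationsB_loop, pvParse, hsp,
              hp1, hp2, if_false, if_true, PySem.List.len_eq]
            rcases hi : PySem.Int.ofStr? s1 with _ | i
            · simp [hi]
            · simp only [hi, Option.map_some]
              cases op2
              · simp only [Bool.false_or, Bool.or_false]
                have hlen : ¬ ((((p0 :: [s1]).length : Int)) ≠ 2) := by simp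
                rw [pv_set_contains values i, pv_contains_eq i h]
                cases hc : groups.contains i
                · simp [hlen]
                · simp only [hlen, Bool.not_true, if_neg, Bool.not_false, if_true,
                    ite_false, ite_true, reduceIte, decide_true, not_true_eq_false,
                    not_false_eq_true]
                  have hkeys : PySem.Set.discard values.keys i = (values.erase i).keys := by
                    rw [pv_keys_erase]; rfl
                  rw [hkeys]
                  exact ih (values.erase i) (groups.erase i) true (pv_forall2_filter i h)
              · simp [hi]
          · simp [simulate_operationsA_loop, simulate_operationsB_loop, pvParse, hsp,
              hp1, hp2]
      rcases pt with _ | ⟨s3, pt⟩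
      · -- parts = [p0, s1, s2]
        by_cases hp1 : p0 = "1"
        · simp only [simulate_operationsA_loop, simulate_operationsB_loop, pvParse, hsp,
            hp1, if_true, PySem.List.len_eq]
          rcases hi : PySem.Int.ofStr? s1 with _ | i
          · simp [hi]
          rcases hj : PySem.Int.ofStr? s2 with _ | j
          · simp [hi, hj]
          simp only [hi, hj]
          have hlen : ¬ ((((p0 :: [s1, s2]).length : Int)) ≠ 3) := by simp
          rw [pv_set_contains values i, pv_set_contains values j,
            pv_contains_eq i h, pv_contains_eq j h]
          by_cases hij : i = j
          · simp [hlen, hij]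
          have hji : j ≠ i := fun hx => hij hx.symm
          cases hci : groups.contains i
          · simp [hlen, hci]
          cases hcj : groups.contains j
          · simp [hlen, hcj]
          simp only [hlen, hci, hcj, Bool.not_true, Bool.or_false, Bool.false_or,
            beq_iff_eq, hij, decide_false, if_neg, not_false_eq_true, ite_false,
            ite_true, reduceIte, if_false, Bool.or_self, not_true_eq_false]
          -- both guards are false; recurse
          obtain ⟨gi, hgi⟩ : ∃ gi, groups.get? i = some gi := by
            have := PySem.Dict.contains_eq_isSome_get? groups i
            rw [hci] at this
            exact Option.isSome_iff_exists.mp this.symm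
          obtain ⟨gj, hgj⟩ : ∃ gj, groups.get? j = some gj := by
            have := PySem.Dict.contains_eq_isSome_get? groups j
            rw [hcj] at this
            exact Option.isSome_iff_exists.mp this.symm
          have hcvj : values.contains j = true := by rw [pv_contains_eq j h]; exact hcj
          have hvi : values.getD i 0 = gi.foldl (· * ·) 1 := by
            rw [PySem.Dict.getD_eq_get?_getD, pv_get?_eq i h, hgi]; rfl
          have hvj : values.getD j 0 = gj.foldl (· * ·) 1 := by
            rw [PySem.Dict.getD_eq_get?_getD, pv_get?_eq j h, hgj]; rfl
          have hgdi : groups.getD i [] = gi := by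
            rw [PySem.Dict.getD_eq_get?_getD, hgi]; rfl
          have hgdj : (groups.erase i).getD j [] = gj := by
            rw [PySem.Dict.getD_eq_get?_getD, pv_get?_erase_ne groups i j hji, hgj]; rfl
          have hw : values.getD i 0 * values.getD j 0
              = ((groups.erase i).getD j [] ++ groups.getD i []).foldl (· * ·) 1 := by
            rw [hvi, hvj, hgdi, hgdj, pv_foldl_mul_append]
            exact mul_comm _ _
          have hcgj' : (groups.erase i).contains j = true := by
            rw [PySem.Dict.contains_eq_isSome_get?, pv_get?_erase_ne groups i j hji, hgj]; rfl
          have h1 : ((values.insert j (values.getD i 0 * values.getD j 0)).erase i).items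
              = (values.items.map
                  (fun p => if p.1 == j then (j, values.getD i 0 * values.getD j 0) else p)).filter
                  (fun p => !(p.1 == i)) := by
            have hins := PySem.Dict.items_insert_of_contains values
              (values.getD i 0 * values.getD j 0) hcvj
            simp only [PySem.Dict.erase, hins]
          have h2 : (((groups.erase i).insert j
                ((groups.erase i).getD j [] ++ groups.getD i [])).items)
              = ((groups.items.filter (fun p => !(p.1 == i))).map
                  (fun p => if p.1 == j then (j, (groups.erase i).getD j [] ++ groups.getD i []) else p)) := by
            have hins := PySem.Dict.items_insert_of_contains (groups.erase i)
              ((groups.erase i).getD j [] ++ groups.getD i []) hcgj'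
            rw [hins]
            simp only [PySem.Dict.erase]
          have hrel' := pv_forall2_update i j
            (values.getD i 0 * values.getD j 0)
            ((groups.erase i).getD j [] ++ groups.getD i []) hji hw h
          rw [← h1, ← h2] at hrel'
          have hkeys : PySem.Set.discard values.keys i
              = (((values.insert j (values.getD i 0 * values.getD j 0)).erase i)).keys := by
            rw [pv_keys_erase, PySem.Dict.keys_insert_of_contains values _ hcvj]; rfl
          rw [hkeys]
          exact ih _ _ op2 hrel'
        · by_cases hp2 : p0 = "2"
          · have hlen : (((p0 :: [s1, s2]).length : Int)) ≠ 2 := by simp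
            simp [simulate_operationsA_loop, simulate_operationsB_loop, pvParse, hsp,
              hp1, hp2, PySem.List.len_eq, hlen]
          · simp [simulate_operationsA_loop, simulate_operationsB_loop, pvParse, hsp,
              hp1, hp2]
      · -- parts has ≥ 4 elements
        have hl3 : (((p0 :: s1 :: s2 :: s3 :: pt).length : Int)) ≠ 3 := by
          simp; omega
        have hl2 : (((p0 :: s1 :: s2 :: s3 :: pt).length : Int)) ≠ 2 := by
          simp; omega
        by_cases hp1 : p0 = "1" <;> by_cases hp2 : p0 = "2" <;>
          simp [simulate_operationsA_loop, simulate_operationsB_loop, pvParse, hsp,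
            hp1, hp2, PySem.List.len_eq, hl3, hl2]

theorem pv_init_rel (arr : List Int) :
    List.Forall₂ pvRel
      (((PySem.List.enumerate arr 1).foldl (fun d p => d.insert p.1 p.2)
          PySem.Dict.empty).items)
      (((PySem.List.enumerate arr 1).foldl (fun d p => d.insert p.1 [p.2])
          PySem.Dict.empty).items) := by
  have hnd : ((PySem.List.enumerate arr 1).map (fun p => p.1)).Nodup := by
    rw [PySem.List.map_fst_enumerate]
    exact PySem.List.nodup_pyRange_one _ _
  have hv := PySem.Dict.items_foldl_insert_fresh (PySem.List.enumerate arr 1)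
    (fun p => p.1) (fun p => p.2) PySem.Dict.empty
    (fun a _ => PySem.Dict.contains_empty _) hnd
  have hg := PySem.Dict.items_foldl_insert_fresh (PySem.List.enumerate arr 1)
    (fun p => p.1) (fun p => [p.2]) PySem.Dict.empty
    (fun a _ => PySem.Dict.contains_empty _) hnd
  rw [hv, hg]
  simp only [PySem.Dict.empty, List.nil_append]
  induction PySem.List.enumerate arr 1 with
  | nil => exact List.Forall₂.nil
  | cons e t iht =>
      exact List.Forall₂.cons ⟨rfl, (one_mul e.2).symm⟩ iht

-- ===== VERDICT (by name: the statement is the Claim_ definition above) =====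
theorem simulate_operations_spec : Claim_equal_simulate_operations := by
  unfold Claim_equal_simulate_operations
  intro arr ops _
  unfold Spec_simulate_operations simulate_operations simulate_operations_alt
  have hrel := pv_init_rel arr
  have hkeys : PySem.Set.ofList (PySem.List.pyRange 1 (PySem.List.len arr + 1) 1)
      = ((PySem.List.enumerate arr 1).foldl (fun d p => d.insert p.1 p.2)
          PySem.Dict.empty).keys := by
    have hv := PySem.Dict.items_foldl_insert_fresh (PySem.List.enumerate arr 1)
      (fun p => p.1) (fun p => p.2) PySem.Dict.empty
      (fun a _ => PySem.Dict.contains_empty _)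
      (by rw [PySem.List.map_fst_enumerate]; exact PySem.List.nodup_pyRange_one _ _)
    show _ = (((PySem.List.enumerate arr 1).foldl (fun d p => d.insert p.1 p.2)
          PySem.Dict.empty).items).map (fun p => p.1)
    rw [hv]
    simp only [PySem.Dict.empty, List.nil_append, List.map_map]
    have : ((fun p : Int × Int => p.1) ∘ fun a : Int × Int => (a.1, a.2))
        = fun p : Int × Int => p.1 := rfl
    rw [this, PySem.List.map_fst_enumerate]
    have harg : PySem.List.len arr + 1 = 1 + (arr.length : Int) := by
      rw [PySem.List.len_eq]; ring
    rw [harg]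
    exact pv_ofList_append _ [] (by simpa using PySem.List.nodup_pyRange_one 1 (1 + (arr.length : Int)))
  rw [hkeys]
  exact pv_loop_eq ops _ _ false hrel
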